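-- pv_equiv track=rewrite | github.com/MartinKjunior/AdventOfCode2023 | Day14/solution.py | calculate_rock_vals
-- ===== SOURCE A (Python) =====
-- def calculate_rock_vals(data: list[str]) -> list[list[int]]:
--     result = [[] for _ in range(len(data[0]))] #gathering results for each column separately
--     height = len(data)
--     values = [height for _ in range(height)] #calculating valid rock values
--     for i, row in enumerate(data):
--         for j, char in enumerate(row):
--             if char == '#':
--                 #the boundary defined the new maximum possible value
--                 values[j] = height - i - 1
--             elif char == 'O':
--                 #assign the value to the rock
--                 #the next rock will have a value of 1 less since it's under the previous rock
--                 result[j].append(values[j])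
--                 values[j] -= 1
--     return result
-- ===== SOURCE B (Python) =====
-- def calculate_rock_vals(data: list[str]) -> list[list[int]]:
--     # Column-wise: split each column on '#'; within a segment the k-th rock
--     # (in order) always lands at load height-pos-k, regardless of where it sat.
--     height = len(data)
--     result = []
--     for j in range(len(data[0])):
--         col = ''.join(data[i][j] if j < len(data[i]) else '.' for i in range(height))
--         loads = []
--         pos = 0
--         for seg in col.split('#'):
--             count = seg.count('O')
--             loads.extend(range(height - pos, height - pos - count, -1))
--             pos += len(seg) + 1
--         result.append(loads)
--     return result
-- ===== Notes on version B (the rewrite author's own statement) =====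
-- stated objective: alternative
-- what changed: Replaces the row-major simulation that maintains per-column value/result arrays by a column-wise pass that splits each column on '#' and emits each segment's loads as a closed-form descending range from the segment's start position.
import Mathlib
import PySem

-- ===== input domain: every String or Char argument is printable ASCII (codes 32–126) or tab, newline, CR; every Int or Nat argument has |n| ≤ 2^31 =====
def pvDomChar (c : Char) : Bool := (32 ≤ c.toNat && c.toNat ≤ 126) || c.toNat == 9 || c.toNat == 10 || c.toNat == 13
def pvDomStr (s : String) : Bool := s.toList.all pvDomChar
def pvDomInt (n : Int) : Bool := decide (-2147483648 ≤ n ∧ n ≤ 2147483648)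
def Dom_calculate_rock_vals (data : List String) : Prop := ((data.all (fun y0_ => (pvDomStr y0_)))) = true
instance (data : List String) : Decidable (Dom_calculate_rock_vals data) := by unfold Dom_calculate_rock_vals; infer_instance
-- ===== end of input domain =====

-- B replaces A's row-major value/result-array simulation by a column-wise pass that splits
-- each column on '#' and emits each segment's loads as a descending range (alternative algorithm).

-- ===== PORT A =====
-- one character step of A's inner loop (q = (j, char)); out-of-range set/getD never happens inside Pre_
def pvStepA (height i : Int) (st : List (List Int) × List Int) (q : Int × Char) : List (List Int) × List Int :=
  if q.2 = '#' then (st.1, st.2.set q.1.toNat (height - i - 1))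
  else if q.2 = 'O' then
    (st.1.set q.1.toNat (st.1.getD q.1.toNat [] ++ [st.2.getD q.1.toNat 0]),
     st.2.set q.1.toNat (st.2.getD q.1.toNat 0 - 1))
  else st

-- len(data[0]) raises IndexError on empty data in Python: excluded by Pre_, headD "" there
def calculate_rock_vals (data : List String) : List (List Int) :=
  let height : Int := (data.length : Int)
  let result : List (List Int) := List.replicate (data.headD "").toList.length []
  let values : List Int := List.replicate data.length height
  ((PySem.List.enumerate data 0).foldl
    (fun st p => (PySem.List.enumerate p.2.toList 0).foldl (pvStepA height p.1) st)
    (result, values)).1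

-- ===== PORT B =====
def calculate_rock_vals_alt (data : List String) : List (List Int) :=
  let height : Int := (data.length : Int)
  (PySem.List.pyRange 0 ((data.headD "").toList.length : Int) 1).foldl (fun result j =>
    let col : List Char := (PySem.List.pyRange 0 height 1).map (fun i =>
      let row := (data.getD i.toNat "").toList
      if j < (row.length : Int) then row.getD j.toNat '.' else '.')
    let r := (PySem.Chars.splitOn col ['#']).foldl
      (fun (lp : List Int × Int) seg =>
        let count : Int := (PySem.Chars.count seg ['O'] : Int)
        (lp.1 ++ PySem.List.pyRange (height - lp.2) (height - lp.2 - count) (-1),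
         lp.2 + (seg.length : Int) + 1))
      (([] : List Int), (0 : Int))
    result ++ [r.1]) []

-- ===== PRECONDITION & SPEC =====
-- Pre_ excludes exactly the inputs where A raises IndexError: empty data (data[0]), a '#' at a
-- column index ≥ len(data) (values[j]), or an 'O' at a column index ≥ len(data) or ≥ len(data[0]).
def Pre_calculate_rock_vals (data : List String) : Prop :=
  data ≠ [] ∧ ∀ row ∈ data, ∀ j : Nat, j < row.toList.length →
    (row.toList.getD j '.' = '#' → j < data.length) ∧
    (row.toList.getD j '.' = 'O' → j < data.length ∧ j < (data.headD "").toList.length)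
instance (data : List String) : Decidable (Pre_calculate_rock_vals data) := by
  unfold Pre_calculate_rock_vals; infer_instance

def pvWitness_calculate_rock_vals : List String := ["O#", ".O"]

def Spec_calculate_rock_vals (data : List String) (out : List (List Int)) : Prop := out = calculate_rock_vals_alt data
instance (data : List String) (out : List (List Int)) : Decidable (Spec_calculate_rock_vals data out) := by unfold Spec_calculate_rock_vals; infer_instance

-- ===== CLAIM (what is proved, stated in full; the proofs are below) =====
def Claim_equal_calculate_rock_vals : Prop := ∀ (data : List String), Dom_calculate_rock_vals data → Pre_calculate_rock_vals data → Spec_calculate_rock_vals data (calculate_rock_vals data)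

-- ===== LEMMAS AND PROOFS =====

-- descending emission [v, v-1, …, v-k+1]
def pvEmits (v : Int) (k : Nat) : List Int := (List.range k).map (fun t : Nat => v - (t : Int))

-- the per-column stateful walk (A's behaviour at one column), returning (value, loads)
def pvWalk (n : Int) : List Char → Nat → Int → List Int → Int × List Int
  | [], _, v, a => (v, a)
  | c :: t, p, v, a =>
    if c = '#' then pvWalk n t (p + 1) (n - (p : Int) - 1) a
    else if c = 'O' then pvWalk n t (p + 1) (v - 1) (a ++ [v])
    else pvWalk n t (p + 1) v a

-- B's segment fold, with the first segment's start value explicit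
def pvBfW (n : Int) : List (List Char) → Int → Nat → List Int → List Int
  | [], _, _, a => a
  | seg :: t, v, p, a =>
    pvBfW n t (n - ((p + seg.length + 1 : Nat) : Int)) (p + seg.length + 1) (a ++ pvEmits v (seg.count 'O'))

-- value functions after processing one row (cs from offset s) at row index i
def pvRowV (n i : Int) (cs : List Char) (s : Nat) (g : Nat → Int) (j : Nat) : Int :=
  if s ≤ j ∧ j - s < cs.length then
    (if cs.getD (j - s) '.' = '#' then n - i - 1
     else if cs.getD (j - s) '.' = 'O' then g j - 1 else g j)
  else g j

def pvRowR (cs : List Char) (s : Nat) (f : Nat → List Int) (g : Nat → Int) (j : Nat) : List Int :=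
  if s ≤ j ∧ j - s < cs.length ∧ cs.getD (j - s) '.' = 'O' then f j ++ [g j] else f j

theorem pv_set_map_range {α : Type} (n s : Nat) (g : Nat → α) (x : α) (hs : s < n) :
    ((List.range n).map g).set s x = (List.range n).map (fun j => if j = s then x else g j) := by
  apply List.ext_getElem <;> simp
  intro i hi
  rcases eq_or_ne i s with rfl | h
  · simp
  · simp [h, h.symm]

theorem pv_getD_map_range {α : Type} (n s : Nat) (g : Nat → α) (d : α) (hs : s < n) :
    ((List.range n).map g).getD s d = g s := by
  simp [List.getD_eq_getElem?_getD, hs]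

theorem pv_count_go (c : Char) : ∀ (fuel : Nat) (l : List Char) (acc : Nat), l.length ≤ fuel →
    PySem.Chars.count.go [c] fuel l acc = acc + l.count c := by
  intro fuel
  induction fuel with
  | zero => intro l acc h; obtain rfl := List.eq_nil_of_length_eq_zero (Nat.le_zero.mp h); simp [PySem.Chars.count.go]
  | succ f ih =>
    intro l acc h
    match l with
    | [] => simp [PySem.Chars.count.go]
    | x :: t =>
      rw [PySem.Chars.count.go]
      simp only [List.isPrefixOf, List.length_cons] at *
      rcases eq_or_ne c x with rfl | hne
      · simp only [BEq.rfl, Bool.true_and]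
        rw [if_pos (by simp)]
        simp only [List.length_cons, List.length_nil, List.drop_succ_cons, List.drop_zero]
        rw [ih t (acc + 1) (by omega)]
        simp [List.count_cons_self]; omega
      · rw [if_neg (by intro hh; exact hne (by simpa using hh))]
        rw [ih t acc (by omega)]
        simp [List.count_cons_of_ne (by simpa using (Ne.symm hne))]

theorem pv_count_singleton (c : Char) (l : List Char) : PySem.Chars.count l [c] = l.count c := by
  rw [PySem.Chars.count]
  simp only [List.isEmpty_cons, if_false, Bool.false_eq_true]
  simpa using pv_count_go c l.length l 0 (le_refl _)

theorem pv_splitOn_go (fuel : Nat) : ∀ (l cur : List Char) (acc : List (List Char)), l.length < fuel →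
    PySem.Chars.splitOn.go ['#'] fuel l cur acc
      = acc.reverse ++ (l.splitOn '#').modifyHead (fun x => cur.reverse ++ x) := by
  induction fuel with
  | zero => intro l cur acc h; omega
  | succ f ih =>
    intro l cur acc h
    match l with
    | [] => simp [PySem.Chars.splitOn.go, List.splitOn]
    | x :: t =>
      rw [PySem.Chars.splitOn.go]
      simp only [List.length_cons] at h
      rcases eq_or_ne x '#' with rfl | hne
      · rw [if_pos (by simp [List.isPrefixOf])]
        simp only [List.length_cons, List.length_nil, List.drop_succ_cons, List.drop_zero]
        rw [ih t [] (cur.reverse :: acc) (by omega)]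
        simp [List.splitOn, List.splitOnP_cons]
        cases List.splitOnP (fun x => x == '#') t <;> simp
      · rw [if_neg (by simp only [List.isPrefixOf, Bool.and_eq_true, beq_iff_eq]; intro hh; exact hne hh.1.symm)]
        rw [ih t (x :: cur) acc (by omega)]
        have hsp : (x :: t).splitOn '#' = (t.splitOn '#').modifyHead (fun y => x :: y) := by
          simp only [List.splitOn, List.splitOnP_cons]
          rw [if_neg (by intro hh; exact hne (by simpa using hh))]
        rw [hsp, List.modifyHead_modifyHead]
        have hfe : (fun (z : List Char) => (x :: cur).reverse ++ z)
            = ((fun z => cur.reverse ++ z) ∘ fun y => x :: y) := by funext y; simp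
        rw [hfe]

theorem pv_splitOn_singleton (l : List Char) : PySem.Chars.splitOn l ['#'] = l.splitOn '#' := by
  rw [PySem.Chars.splitOn, pv_splitOn_go (l.length + 1) l [] [] (by omega)]
  simp
  cases List.splitOn '#' l <;> simp

theorem pvEmits_succ (v : Int) (k : Nat) : pvEmits v (k + 1) = v :: pvEmits (v - 1) k := by
  simp only [pvEmits, List.range_succ_eq_map, List.map_cons, List.map_map]
  congr 1
  · simp
  · apply List.map_congr_left; intro t _; simp only [Function.comp_apply]; push_cast; ring

-- B's literal fold over the segments equals pvBfW started at value n - p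
theorem pv_bfold_eq (n : Int) (segs : List (List Char)) : ∀ (p : Nat) (a : List Int),
    (segs.foldl (fun (lp : List Int × Int) seg =>
        (lp.1 ++ PySem.List.pyRange (n - lp.2) (n - lp.2 - ((PySem.Chars.count seg ['O'] : Nat) : Int)) (-1),
         lp.2 + (seg.length : Int) + 1)) (a, (p : Int))).1
      = pvBfW n segs (n - (p : Int)) p a := by
  intro p a
  induction segs generalizing p a with
  | nil => simp [pvBfW]
  | cons seg t ih =>
    rw [List.foldl_cons, pvBfW]
    have h2 : PySem.List.pyRange (n - (p : Int))
        (n - (p : Int) - ((PySem.Chars.count seg ['O'] : Nat) : Int)) (-1)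
        = pvEmits (n - (p : Int)) (seg.count 'O') := by
      rw [PySem.List.pyRange_neg_one]
      have : (n - (p : Int) - (n - (p : Int) - ((PySem.Chars.count seg ['O'] : Nat) : Int))).toNat
          = seg.count 'O' := by rw [pv_count_singleton] at *; omega
      rw [this, pvEmits]
    rw [h2]
    have h1 : ((p : Int) + (seg.length : Int) + 1) = (((p + seg.length + 1 : Nat)) : Int) := by
      push_cast; ring
    rw [h1, ih (p + seg.length + 1)]

-- the heart: the stateful walk equals the split-on-'#' arithmetic
theorem pv_walk_eq_bfw (n : Int) : ∀ (cs : List Char) (p : Nat) (v : Int) (a : List Int),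
    (pvWalk n cs p v a).2 = pvBfW n (cs.splitOn '#') v p a := by
  intro cs
  induction cs with
  | nil =>
    intro p v a
    simp [pvWalk, List.splitOn, List.splitOnP_nil, pvBfW, pvEmits]
  | cons c t ih =>
    intro p v a
    by_cases hc : c = '#'
    · subst hc
      rw [pvWalk, if_pos rfl]
      rw [ih]
      have hsp : ('#' :: t).splitOn '#' = [] :: t.splitOn '#' := by
        simp [List.splitOn, List.splitOnP_cons]
      rw [hsp, pvBfW]
      simp only [List.length_nil, List.count_nil, pvEmits, List.range_zero, List.map_nil,
        List.append_nil]
      have : n - (((p + 0 + 1 : Nat)) : Int) = n - (p : Int) - 1 := by push_cast; ring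
      rw [this]
    · have hsp : (c :: t).splitOn '#' = (t.splitOn '#').modifyHead (fun y => c :: y) := by
        simp only [List.splitOn, List.splitOnP_cons]
        rw [if_neg (by intro hh; exact hc (by simpa using hh))]
      obtain ⟨hd, tl, hsp2⟩ : ∃ hd tl, t.splitOn '#' = hd :: tl := by
        rcases he : t.splitOn '#' with _ | ⟨hd, tl⟩
        · exact absurd he (List.splitOnP_ne_nil _ _)
        · exact ⟨hd, tl, rfl⟩
      rw [hsp, hsp2, List.modifyHead_cons]
      by_cases hO : c = 'O'
      · subst hO
        rw [pvWalk, if_neg hc, if_pos rfl, ih, hsp2, pvBfW, pvBfW]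
        rw [List.count_cons_self, pvEmits_succ]
        have hpos : ((p + 1) + hd.length + 1) = (p + (hd.length + 1) + 1) := by omega
        rw [hpos]
        simp
      · rw [pvWalk, if_neg hc, if_neg hO, ih, hsp2, pvBfW, pvBfW]
        rw [List.count_cons_of_ne (by simpa using hO)]
        have hpos : ((p + 1) + hd.length + 1) = (p + (hd.length + 1) + 1) := by omega
        rw [hpos]
        simp

theorem pvRowV_lt (n i : Int) (cs : List Char) (s : Nat) (g : Nat → Int) (j : Nat)
    (h : j < s) : pvRowV n i cs s g j = g j := by
  unfold pvRowV; rw [if_neg]; rintro ⟨hh, -⟩; omega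

theorem pvRowV_self (n i : Int) (c : Char) (t : List Char) (s : Nat) (g : Nat → Int) :
    pvRowV n i (c :: t) s g s
      = (if c = '#' then n - i - 1 else if c = 'O' then g s - 1 else g s) := by
  unfold pvRowV
  rw [if_pos ⟨le_refl s, by simp⟩]
  simp

theorem pvRowV_gt (n i : Int) (c : Char) (t : List Char) (s : Nat) (g : Nat → Int) (j : Nat)
    (h : s < j) : pvRowV n i (c :: t) s g j = pvRowV n i t (s + 1) g j := by
  unfold pvRowV
  have h1 : j - s = (j - s - 1) + 1 := by omega
  have h2 : j - (s + 1) = j - s - 1 := by omega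
  rw [h1, h2, List.getD_cons_succ, List.length_cons]
  exact if_congr (by omega) rfl rfl

theorem pvRowV_congr (n i : Int) (cs : List Char) (s : Nat) (g g' : Nat → Int) (j : Nat)
    (h : g j = g' j) : pvRowV n i cs s g j = pvRowV n i cs s g' j := by
  unfold pvRowV; rw [h]

theorem pvRowR_lt (cs : List Char) (s : Nat) (f : Nat → List Int) (g : Nat → Int) (j : Nat)
    (h : j < s) : pvRowR cs s f g j = f j := by
  unfold pvRowR; rw [if_neg]; rintro ⟨hh, -⟩; omega

theorem pvRowR_self (c : Char) (t : List Char) (s : Nat) (f : Nat → List Int) (g : Nat → Int) :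
    pvRowR (c :: t) s f g s = (if c = 'O' then f s ++ [g s] else f s) := by
  unfold pvRowR
  rcases eq_or_ne c 'O' with rfl | hne
  · rw [if_pos ⟨le_refl s, by simp, by simp⟩, if_pos rfl]
  · rw [if_neg (by rintro ⟨-, -, hh⟩; simp at hh; exact hne hh), if_neg hne]

theorem pvRowR_gt (c : Char) (t : List Char) (s : Nat) (f : Nat → List Int) (g : Nat → Int)
    (j : Nat) (h : s < j) : pvRowR (c :: t) s f g j = pvRowR t (s + 1) f g j := by
  unfold pvRowR
  have h1 : j - s = (j - s - 1) + 1 := by omega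
  have h2 : j - (s + 1) = j - s - 1 := by omega
  rw [h1, h2, List.getD_cons_succ, List.length_cons]
  refine if_congr ⟨fun ⟨hx, hy, hz⟩ => ⟨by omega, by omega, hz⟩,
    fun ⟨hx, hy, hz⟩ => ⟨by omega, by omega, hz⟩⟩ rfl rfl

theorem pvRowR_congr (cs : List Char) (s : Nat) (f f' : Nat → List Int) (g g' : Nat → Int)
    (j : Nat) (hf : f j = f' j) (hg : g j = g' j) : pvRowR cs s f g j = pvRowR cs s f' g' j := by
  unfold pvRowR; rw [hf, hg]

theorem pvRowV_cons (n i : Int) (c : Char) (t : List Char) (s : Nat) (g : Nat → Int) :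
    pvRowV n i (c :: t) s g
      = pvRowV n i t (s + 1)
          (fun j => if j = s then (if c = '#' then n - i - 1 else if c = 'O' then g j - 1 else g j)
                    else g j) := by
  funext j
  rcases lt_trichotomy j s with hl | rfl | hg
  · rw [pvRowV_lt _ _ _ _ _ _ hl, pvRowV_lt _ _ _ _ _ _ (by omega)]
    simp [Nat.ne_of_lt hl]
  · rw [pvRowV_self, pvRowV_lt _ _ _ _ _ _ (by omega)]
    simp
  · rw [pvRowV_gt _ _ _ _ _ _ _ hg,
      pvRowV_congr n i t (s + 1) g
        (fun j => if j = s then (if c = '#' then n - i - 1 else if c = 'O' then g j - 1 else g j)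
                  else g j) j (by beta_reduce; rw [if_neg (by omega : ¬ j = s)])]

theorem pvRowR_cons (n i : Int) (c : Char) (t : List Char) (s : Nat) (f : Nat → List Int)
    (g : Nat → Int) :
    pvRowR (c :: t) s f g
      = pvRowR t (s + 1)
          (fun j => if j = s ∧ c = 'O' then f j ++ [g j] else f j)
          (fun j => if j = s then (if c = '#' then n - i - 1 else if c = 'O' then g j - 1 else g j)
                    else g j) := by
  funext j
  rcases lt_trichotomy j s with hl | rfl | hg
  · rw [pvRowR_lt _ _ _ _ _ hl, pvRowR_lt _ _ _ _ _ (by omega)]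
    simp [Nat.ne_of_lt hl]
  · rw [pvRowR_self, pvRowR_lt _ _ _ _ _ (by omega)]
    simp
  · rw [pvRowR_gt _ _ _ _ _ _ hg,
      pvRowR_congr t (s + 1) f
        (fun j => if j = s ∧ c = 'O' then f j ++ [g j] else f j) g
        (fun j => if j = s then (if c = '#' then n - i - 1 else if c = 'O' then g j - 1 else g j)
                  else g j) j
        (by beta_reduce; rw [if_neg (by omega : ¬ (j = s ∧ c = 'O'))])
        (by beta_reduce; rw [if_neg (by omega : ¬ j = s)])]

-- one row of A's inner loop, as pointwise updates of the two range-maps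
theorem pv_inner_row (n w : Nat) (i : Int) :
    ∀ (cs : List Char) (s : Nat) (f : Nat → List Int) (g : Nat → Int),
    (∀ m : Nat, m < cs.length →
      (cs.getD m '.' = '#' → s + m < n) ∧ (cs.getD m '.' = 'O' → s + m < n ∧ s + m < w)) →
    (PySem.List.enumerate cs (s : Int)).foldl (pvStepA (n : Int) i)
        ((List.range w).map f, (List.range n).map g)
      = ((List.range w).map (pvRowR cs s f g), (List.range n).map (pvRowV (n : Int) i cs s g)) := by
  intro cs
  induction cs with
  | nil =>
    intro s f g h
    have h1 : pvRowR [] s f g = f := by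
      funext j; unfold pvRowR; rw [if_neg]; rintro ⟨-, hh, -⟩; simp at hh
    have h2 : pvRowV (n : Int) i [] s g = g := by
      funext j; unfold pvRowV; rw [if_neg]; rintro ⟨-, hh⟩; simp at hh
    rw [PySem.List.enumerate_nil, h1, h2]
    rfl
  | cons c t ih =>
    intro s f g h
    rw [PySem.List.enumerate_cons, List.foldl_cons]
    have hstep : pvStepA (n : Int) i ((List.range w).map f, (List.range n).map g) (((s : Nat) : Int), c)
        = ((List.range w).map (fun j => if j = s ∧ c = 'O' then f j ++ [g j] else f j),
           (List.range n).map (fun j => if j = s then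
               (if c = '#' then (n : Int) - i - 1 else if c = 'O' then g j - 1 else g j)
             else g j)) := by
      rcases eq_or_ne c '#' with rfl | hhash
      · have hs : s < n := (h 0 (by simp)).1 (by simp)
        simp only [pvStepA, if_pos rfl]
        rw [Int.toNat_natCast, pv_set_map_range n s g _ hs]
        refine congrArg₂ Prod.mk ?_ ?_
        · apply List.map_congr_left; intro j _; simp
        · apply List.map_congr_left; intro j _; simp
      rcases eq_or_ne c 'O' with rfl | hO
      · have hs : s < n := ((h 0 (by simp)).2 (by simp)).1
        have hw : s < w := ((h 0 (by simp)).2 (by simp)).2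
        simp only [pvStepA, if_neg hhash, if_pos rfl]
        rw [Int.toNat_natCast, pv_getD_map_range w s f [] hw, pv_getD_map_range n s g 0 hs,
          pv_set_map_range w s f _ hw, pv_set_map_range n s g _ hs]
        refine congrArg₂ Prod.mk ?_ ?_
        · apply List.map_congr_left; intro j _
          rcases eq_or_ne j s with rfl | hj
          · simp
          · simp [hj]
        · apply List.map_congr_left; intro j _
          rcases eq_or_ne j s with rfl | hj
          · simp
          · simp [hj]
      · simp only [pvStepA, if_neg hhash, if_neg hO]
        refine congrArg₂ Prod.mk ?_ ?_
        · apply List.map_congr_left; intro j _; simp [hO]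
        · apply List.map_congr_left; intro j _; simp [hhash, hO]
    have hcast : ((s : Nat) : Int) + 1 = (((s + 1 : Nat)) : Int) := by push_cast; ring
    rw [hstep, hcast, ih (s + 1) _ _ ?_]
    · rw [pvRowR_cons (n : Int) i c t s f g, pvRowV_cons (n : Int) i c t s g]
    · intro m hm
      have := h (m + 1) (by simpa using Nat.succ_lt_succ hm)
      simpa [Nat.add_comm, Nat.add_assoc, Nat.add_left_comm] using this

-- A's outer loop equals the per-column walk
theorem pv_outer (n w : Nat) :
    ∀ (rows : List String) (s : Nat) (f : Nat → List Int) (g : Nat → Int),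
    (∀ r ∈ rows, ∀ m : Nat, m < r.toList.length →
      (r.toList.getD m '.' = '#' → m < n) ∧ (r.toList.getD m '.' = 'O' → m < n ∧ m < w)) →
    (PySem.List.enumerate rows (s : Int)).foldl
        (fun st p => (PySem.List.enumerate p.2.toList 0).foldl (pvStepA (n : Int) p.1) st)
        ((List.range w).map f, (List.range n).map g)
      = ((List.range w).map (fun j => (pvWalk (n : Int) (rows.map (fun r => r.toList.getD j '.')) s (g j) (f j)).2),
         (List.range n).map (fun j => (pvWalk (n : Int) (rows.map (fun r => r.toList.getD j '.')) s (g j) (f j)).1)) := by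
  intro rows
  induction rows with
  | nil =>
    intro s f g h
    rw [PySem.List.enumerate_nil]
    simp [pvWalk]
  | cons r rest ih =>
    intro s f g h
    rw [PySem.List.enumerate_cons, List.foldl_cons]
    have hrow : ∀ m : Nat, m < r.toList.length →
        (r.toList.getD m '.' = '#' → 0 + m < n) ∧
        (r.toList.getD m '.' = 'O' → 0 + m < n ∧ 0 + m < w) := by
      intro m hm
      have := h r (List.mem_cons_self) m hm
      simpa using this
    have hinner := pv_inner_row n w ((s : Nat) : Int) r.toList 0 f g hrow
    have hz : ((0 : Nat) : Int) = (0 : Int) := rfl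
    rw [hz] at hinner
    rw [hinner]
    rw [show ((s : Nat) : Int) + 1 = (((s + 1 : Nat)) : Int) by push_cast; ring]
    rw [ih (s + 1) (pvRowR r.toList 0 f g) (pvRowV (n : Int) ((s : Nat) : Int) r.toList 0 g)
      (fun r' hr' => h r' (List.mem_cons_of_mem _ hr'))]
    have hstep : ∀ j : Nat,
        pvWalk (n : Int) ((r :: rest).map (fun r => r.toList.getD j '.')) s (g j) (f j)
        = pvWalk (n : Int) (rest.map (fun r => r.toList.getD j '.')) (s + 1)
            (pvRowV (n : Int) ((s : Nat) : Int) r.toList 0 g j) (pvRowR r.toList 0 f g j) := by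
      intro j
      rw [List.map_cons, pvWalk]
      by_cases hlen : j < r.toList.length
      · have hV : pvRowV (n : Int) ((s : Nat) : Int) r.toList 0 g j
            = (if r.toList.getD j '.' = '#' then (n : Int) - ((s : Nat) : Int) - 1
               else if r.toList.getD j '.' = 'O' then g j - 1 else g j) := by
          unfold pvRowV; rw [if_pos ⟨Nat.zero_le j, by omega⟩]
          simp
        have hR : pvRowR r.toList 0 f g j
            = (if r.toList.getD j '.' = 'O' then f j ++ [g j] else f j) := by
          unfold pvRowR
          rcases eq_or_ne (r.toList.getD j '.') 'O' with hO | hO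
          · rw [if_pos ⟨Nat.zero_le j, by omega, hO⟩, if_pos hO]
          · rw [if_neg (by rintro ⟨-, -, hh⟩; exact hO hh), if_neg hO]
        rw [hV, hR]
        split_ifs with h1 h2 <;>
          first
          | rfl
          | (exfalso; rw [h1] at h2; exact absurd h2 (by decide))
      · have hc : r.toList.getD j '.' = '.' := List.getD_eq_default _ _ (by omega)
        rw [hc, if_neg (by decide), if_neg (by decide)]
        have hV : pvRowV (n : Int) ((s : Nat) : Int) r.toList 0 g j = g j := by
          unfold pvRowV; rw [if_neg]; rintro ⟨-, hh⟩; omega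
        have hR : pvRowR r.toList 0 f g j = f j := by
          unfold pvRowR; rw [if_neg]; rintro ⟨-, hh, -⟩; omega
        rw [hV, hR]
    refine congrArg₂ Prod.mk ?_ ?_
    · apply List.map_congr_left; intro j _; rw [hstep j]
    · apply List.map_congr_left; intro j _; rw [hstep j]

theorem pv_map_range_getD {α β : Type} (l : List α) (d : α) (F : α → β) :
    (List.range l.length).map (fun i => F (l.getD i d)) = l.map F := by
  apply List.ext_getElem <;> simp
  intro i hi _
  simp [List.getElem?_eq_getElem hi]

-- ===== VERDICT (by name: the statement is the Claim_ definition above) =====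
theorem calculate_rock_vals_spec : Claim_equal_calculate_rock_vals := by
  intro data _ hpre
  unfold Spec_calculate_rock_vals
  obtain ⟨hne, hcond⟩ := hpre
  simp only [calculate_rock_vals, calculate_rock_vals_alt]
  have hrep1 : List.replicate (data.headD "").toList.length ([] : List Int)
      = (List.range (data.headD "").toList.length).map (fun _ => ([] : List Int)) := by
    simp
  have hrep2 : List.replicate data.length ((data.length : Nat) : Int)
      = (List.range data.length).map (fun _ => ((data.length : Nat) : Int)) := by
    simp
  have hcond' : ∀ r ∈ data, ∀ m : Nat, m < r.toList.length →
      (r.toList.getD m '.' = '#' → m < data.length) ∧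
      (r.toList.getD m '.' = 'O' → m < data.length ∧ m < (data.headD "").toList.length) := by
    intro r hr m hm
    exact hcond r hr m hm
  have houter := pv_outer data.length (data.headD "").toList.length data 0
    (fun _ => ([] : List Int)) (fun _ => ((data.length : Nat) : Int)) hcond'
  rw [show (((0 : Nat)) : Int) = (0 : Int) from rfl] at houter
  rw [hrep1, hrep2, houter]
  rw [PySem.List.foldl_append_singleton_eq_map, List.nil_append]
  simp only []
  rw [PySem.List.pyRange_zero_nat data.length,
    PySem.List.pyRange_zero_nat ((data.headD "").toList.length), List.map_map]
  apply List.map_congr_left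
  intro k hk
  simp only [Function.comp_apply, Int.toNat_natCast]
  have hcol : (List.map (fun i : Int =>
        if ((k : Nat) : Int) < ((data.getD i.toNat "").toList.length : Int)
        then (data.getD i.toNat "").toList.getD k '.' else '.')
      ((List.range data.length).map (fun k : Nat => ((k : Nat) : Int))))
      = data.map (fun r => r.toList.getD k '.') := by
    rw [List.map_map]
    rw [← pv_map_range_getD data "" (fun r => r.toList.getD k '.')]
    apply List.map_congr_left
    intro i _
    simp only [Function.comp_apply, Int.toNat_natCast]
    by_cases hlt : k < (data.getD i "").toList.length
    · rw [if_pos (by exact_mod_cast hlt)]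
    · rw [if_neg (by exact_mod_cast hlt), List.getD_eq_default _ _ (by omega)]
  rw [hcol, pv_splitOn_singleton]
  have hb := pv_bfold_eq ((data.length : Nat) : Int)
    ((data.map (fun r => r.toList.getD k '.')).splitOn '#') 0 []
  rw [show (((0 : Nat)) : Int) = (0 : Int) from rfl] at hb
  rw [show ((data.length : Nat) : Int) - (0 : Int) = ((data.length : Nat) : Int) by ring] at hb
  rw [hb, ← pv_walk_eq_bfw]
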